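-- pv_equiv track=rewrite | github.com/MariusJM/advent_of_code | 2016/day_04_security_through_obscurity_part_one.py | get_name_id
-- ===== SOURCE A (Python) =====
-- def get_name_id(input_data):
--     name = ""
--     sector_id = ""
--     for i in range(len(input_data)):
--         if input_data[i].isalpha():
--             name += input_data[i]
--         elif input_data[i].isnumeric():
--             sector_id += input_data[i]
--         elif input_data[i] == "[":
--             break
--     return name, int(sector_id)
-- ===== SOURCE B (Python) =====
-- def get_name_id(input_data):
--     cut = input_data.find("[")
--     head = input_data if cut < 0 else input_data[:cut]
--     name = "".join(c for c in head if c.isalpha())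
--     sector_id = "".join(c for c in head if c.isnumeric())
--     return name, int(sector_id)
-- ===== Notes on version B (the rewrite author's own statement) =====
-- stated objective: simpler
-- what changed: Replaces A's single stateful character loop (two string accumulators with an early break) by cutting the string at the first '[' and running two independent filtering passes over that head.
import Mathlib
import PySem

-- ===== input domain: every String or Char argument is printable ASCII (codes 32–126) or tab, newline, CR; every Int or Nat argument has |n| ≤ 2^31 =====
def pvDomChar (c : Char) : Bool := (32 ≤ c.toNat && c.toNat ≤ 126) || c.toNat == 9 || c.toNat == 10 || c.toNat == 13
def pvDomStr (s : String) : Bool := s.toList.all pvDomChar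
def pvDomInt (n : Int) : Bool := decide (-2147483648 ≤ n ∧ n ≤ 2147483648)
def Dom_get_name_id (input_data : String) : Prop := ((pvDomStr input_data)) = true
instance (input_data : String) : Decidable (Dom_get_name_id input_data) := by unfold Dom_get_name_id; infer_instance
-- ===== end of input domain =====

-- B replaces A's single stateful character loop (two accumulators, early break) by cutting the
-- string at the first '[' and running two independent filtering passes over that head; return
-- values agree on Pre_ (a digit occurs before the first '['). Python's .isalpha()/.isnumeric()
-- are ported as PySem.Chars.isalpha/isdigit, exact on the ASCII domain Dom.

-- ===== PORT A =====
-- the for/break loop of A, carrying the two string accumulators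
def getNameIdGo : List Char → String → String → String × String
  | [], name, sid => (name, sid)
  | c :: rest, name, sid =>
    if PySem.Chars.isalpha c then getNameIdGo rest (name.push c) sid
    else if PySem.Chars.isdigit c then getNameIdGo rest name (sid.push c)
    else if c = '[' then (name, sid)     -- break
    else getNameIdGo rest name sid

def get_name_id (input_data : String) : String × Int :=
  let r := getNameIdGo input_data.toList "" ""
  (r.1, (PySem.Int.ofStr? r.2).getD 0)   -- int(sector_id); ValueError excluded by Pre_

-- ===== PORT B =====
def get_name_id_alt (input_data : String) : String × Int :=
  let cut := PySem.Str.find input_data "["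
  let head := if cut < 0 then input_data.toList
              else PySem.List.slice input_data.toList none (some cut)
  let name := String.ofList (head.filter PySem.Chars.isalpha)
  let sid := String.ofList (head.filter PySem.Chars.isdigit)
  (name, (PySem.Int.ofStr? sid).getD 0)  -- int(sector_id); ValueError excluded by Pre_

-- ===== PRECONDITION & SPEC =====
-- Pre_ excludes exactly the inputs with no digit before the first '[', on which both A's and
-- B's int("…") raises ValueError.
def Pre_get_name_id (input_data : String) : Prop :=
  (input_data.toList.takeWhile (· ≠ '[')).any PySem.Chars.isdigit = true
instance (input_data : String) : Decidable (Pre_get_name_id input_data) := by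
  unfold Pre_get_name_id; infer_instance

def pvWitness_get_name_id : String := "aaa-bbb-123[abc]"

def Spec_get_name_id (input_data : String) (out : String × Int) : Prop := out = get_name_id_alt input_data
instance (input_data : String) (out : String × Int) : Decidable (Spec_get_name_id input_data out) := by unfold Spec_get_name_id; infer_instance

-- ===== CLAIM (what is proved, stated in full; the proofs are below) =====
def Claim_equal_get_name_id : Prop := ∀ (input_data : String), Dom_get_name_id input_data → Pre_get_name_id input_data → Spec_get_name_id input_data (get_name_id input_data)

-- ===== LEMMAS AND PROOFS =====

theorem isdigit_eq_false_of_isalpha {c : Char} (h : PySem.Chars.isalpha c = true) :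
    PySem.Chars.isdigit c = false := by
  simp only [PySem.Chars.isalpha, PySem.Chars.isupper, PySem.Chars.islower,
    PySem.Chars.isdigit, Bool.or_eq_true, Bool.and_eq_true, decide_eq_true_eq,
    Bool.and_eq_false_iff, decide_eq_false_iff_not, UInt32.le_iff_toNat_le, Char.le_def] at *
  simp only [show '0'.val.toNat = 48 from rfl, show '9'.val.toNat = 57 from rfl,
    show 'A'.val.toNat = 65 from rfl, show 'Z'.val.toNat = 90 from rfl,
    show 'a'.val.toNat = 97 from rfl, show 'z'.val.toNat = 122 from rfl] at *
  omega

-- A's loop returns the two filters of the prefix before the first '[' appended to the accumulators.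
theorem getNameIdGo_spec (l : List Char) (name sid : String) :
    getNameIdGo l name sid =
      (String.ofList (name.toList ++ (l.takeWhile (fun x => !decide (x = '['))).filter PySem.Chars.isalpha),
       String.ofList (sid.toList ++ (l.takeWhile (fun x => !decide (x = '['))).filter PySem.Chars.isdigit)) := by
  induction l generalizing name sid with
  | nil => simp [getNameIdGo]
  | cons c rest ih =>
    by_cases ha : PySem.Chars.isalpha c = true
    · have hne : c ≠ '[' := by
        rintro rfl
        simp [PySem.Chars.isalpha, PySem.Chars.isupper, PySem.Chars.islower] at ha
      simp [getNameIdGo, ha, ih, hne, isdigit_eq_false_of_isalpha ha]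
    · by_cases hd : PySem.Chars.isdigit c = true
      · have hne : c ≠ '[' := by rintro rfl; simp [PySem.Chars.isdigit] at hd
        simp [getNameIdGo, ha, hd, ih, hne]
      · by_cases hb : c = '['
        · subst hb; simp [getNameIdGo, ha, hd]
        · simp [getNameIdGo, ha, hd, hb, ih]

theorem take_eq_takeWhile_of_first (l : List Char) (n : Nat) (hlt : n < l.length)
    (hn : l[n]? = some '[') (hb : ∀ i, i < n → l[i]? ≠ some '[') :
    l.take n = l.takeWhile (fun x => !decide (x = '[')) := by
  induction l generalizing n with
  | nil => simp at hlt
  | cons c rest ih =>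
    cases n with
    | zero =>
      simp at hn
      subst hn
      simp [List.takeWhile]
    | succ m =>
      have hc : c ≠ '[' := by
        have := hb 0 (Nat.succ_pos m)
        simpa using this
      simp [List.take_succ_cons, hc]
      exact ih m (by simpa using hlt) (by simpa using hn)
        (fun i hi => by have := hb (i+1) (by omega); simpa using this)

-- B's head (cut at find "[") IS the takeWhile prefix.
theorem head_eq_takeWhile (l : List Char) :
    (if PySem.Chars.find l ['['] < 0 then l
     else PySem.List.slice l none (some (PySem.Chars.find l ['[']))) =
      l.takeWhile (fun x => !decide (x = '[')) := by
  by_cases h : PySem.Chars.find l ['['] < 0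
  · have hfind : PySem.Chars.find l ['['] = -1 := by
      have := PySem.Chars.neg_one_le_find l ['[']
      omega
    have hnin : ¬ ['['] <:+: l := (PySem.Chars.find_eq_neg_one_iff l ['[']).mp hfind
    have hmem : '[' ∉ l := fun hm => hnin ((List.singleton_infix_iff '[' l).mpr hm)
    rw [if_pos h]
    symm
    rw [List.takeWhile_eq_self_iff]
    intro c hc
    simp only [Bool.not_eq_true', decide_eq_false_iff_not]
    rintro rfl; exact hmem hc
  · have h0 : 0 ≤ PySem.Chars.find l ['['] := by omega
    obtain ⟨hpre, hmin⟩ := PySem.Chars.find_spec (s := l) (sub := ['[']) h0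
    set n := (PySem.Chars.find l ['[']).toNat with hn
    have hlt : n < l.length := by
      by_contra hge
      rw [not_lt] at hge
      rw [List.drop_eq_nil_of_le hge] at hpre
      simp at hpre
    have hget : l[n]? = some '[' := by
      rcases hpre with ⟨t, ht⟩
      have hdrop : l.drop n = '[' :: t := ht.symm
      have h2 : (l.drop n)[0]? = some '[' := by rw [hdrop]; rfl
      rw [List.getElem?_drop] at h2
      simpa using h2
    have hbefore : ∀ i, i < n → l[i]? ≠ some '[' := by
      intro i hi hcontra
      apply hmin i hi
      have hi' : i < l.length := lt_trans hi hlt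
      rw [List.getElem?_eq_getElem hi'] at hcontra
      have hli : l[i] = '[' := by simpa using hcontra
      refine ⟨l.drop (i+1), ?_⟩
      rw [List.drop_eq_getElem_cons hi', hli]
      rfl
    rw [if_neg h,
      show (PySem.Chars.find l ['[']) = (n : Int) by omega,
      PySem.List.slice_to l (by positivity),
      Int.toNat_natCast]
    exact take_eq_takeWhile_of_first l n hlt hget hbefore

-- ===== VERDICT (by name: the statement is the Claim_ definition above) =====
theorem get_name_id_spec : Claim_equal_get_name_id := by
  intro s _ _
  unfold Spec_get_name_id get_name_id get_name_id_alt
  simp only [PySem.Str.find_eq, getNameIdGo_spec,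
    show ("[".toList : List Char) = ['['] from rfl]
  rw [head_eq_takeWhile]
  simp
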